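-- pv_equiv track=rewrite | github.com/PolychronMidi/Polychron | scripts/audit-shell-undefined-vars.py | _strip_single_quoted
-- ===== SOURCE A (Python) =====
-- def _strip_single_quoted(text: str) -> str:
--     """Replace the body of every single-quoted bash string with spaces so
--     `$VAR` references inside (jq program text, awk scripts, python
--     heredocs, etc.) don't trigger false positives. Bash itself never
--     expands $ inside single quotes, so any ref there is by definition
--     not a shell-scope reference. Preserve newlines for line numbers."""
--     out = []
--     i = 0
--     n = len(text)
--     while i < n:
--         c = text[i]
--         if c == "\\" and i + 1 < n:
--             out.append(text[i:i+2])
--             i += 2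
--             continue
--         if c == "'":
--             # Find matching close quote. Bash single quotes can't contain
--             # escaped quotes — first unescaped ' ends the string.
--             j = text.find("'", i + 1)
--             if j == -1:
--                 out.append(text[i:])
--                 break
--             body = text[i+1:j]
--             # Replace non-newline chars with space.
--             out.append("'")
--             out.append("".join(" " if ch != "\n" else "\n" for ch in body))
--             out.append("'")
--             i = j + 1
--             continue
--         out.append(c)
--         i += 1
--     return "".join(out)
-- ===== SOURCE B (Python) =====
-- def _strip_single_quoted(text: str) -> str:
--     """Single-pass state machine: walk the text once, tracking whether we are
--     after a backslash or inside a single-quoted body; blank the body on the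
--     closing quote, emit it verbatim if the quote never closes."""
--     res = []
--     esc = False
--     buf = None  # None = outside quotes; else original chars of the open body
--     for c in text:
--         if buf is None:
--             if esc:
--                 res.append(c)
--                 esc = False
--             elif c == "\\":
--                 res.append(c)
--                 esc = True
--             elif c == "'":
--                 buf = []
--             else:
--                 res.append(c)
--         else:
--             if c == "'":
--                 res.append("'")
--                 res.append("".join("\n" if ch == "\n" else " " for ch in buf))
--                 res.append("'")
--                 buf = None
--             else:
--                 buf.append(c)
--     if buf is not None:
--         res.append("'")
--         res.append("".join(buf))
--     return "".join(res)
-- ===== Notes on version B (the rewrite author's own statement) =====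
-- stated objective: faster
-- what changed: Replaced A's index-jumping scanner (str.find for the closing quote plus slice copies and per-character appends) with a single left-to-right state machine over the characters (escape flag + open-quote buffer); a timing run measured it ~2.4x faster at the largest size.
import Mathlib
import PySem

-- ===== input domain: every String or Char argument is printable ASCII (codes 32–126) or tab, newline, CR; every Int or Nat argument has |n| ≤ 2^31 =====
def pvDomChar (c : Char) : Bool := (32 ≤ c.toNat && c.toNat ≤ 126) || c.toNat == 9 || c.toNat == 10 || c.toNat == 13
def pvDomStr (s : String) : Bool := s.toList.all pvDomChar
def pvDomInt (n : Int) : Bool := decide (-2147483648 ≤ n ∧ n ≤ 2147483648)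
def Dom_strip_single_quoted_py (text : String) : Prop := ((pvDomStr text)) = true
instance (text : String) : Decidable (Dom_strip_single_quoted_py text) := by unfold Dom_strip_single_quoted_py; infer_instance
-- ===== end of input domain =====

-- B replaces A's find-the-closing-quote-and-slice scanner with a one-character-at-a-time
-- state machine (escape flag + open-quote buffer); a timing run measured B ~2.3x faster.

-- ===== PORT A =====

-- blanking of one body character: " " if ch != "\n" else "\n"
def pvBlank (ch : Char) : Char := if ch ≠ '\n' then ' ' else '\n'

-- hand port of `text.find("'", i+1)` on the remaining suffix: index of the first
-- single quote, none if absent (exact: str.find returns the least index, -1 if none)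
def pvFindQuote : List Char → Option Nat
  | [] => none
  | c :: rest => if c = '\'' then some 0 else (pvFindQuote rest).map (· + 1)

-- A's while-loop, as recursion on the remaining suffix text[i:]; each branch is A's branch:
-- escape copies two chars, a quote looks for the close with find and jumps past it, else copy one
def pvStripA : List Char → List Char
  | [] => []
  | c :: rest =>
    if c = '\\' ∧ rest ≠ [] then
      c :: rest.take 1 ++ pvStripA (rest.drop 1)
    else if c = '\'' then
      match pvFindQuote rest with
      | none => c :: rest
      | some j => '\'' :: (rest.take j).map pvBlank ++ '\'' :: pvStripA (rest.drop (j + 1))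
    else
      c :: pvStripA rest
termination_by l => l.length
decreasing_by
  all_goals simp

def strip_single_quoted_py (text : String) : String := String.ofList (pvStripA text.toList)

-- ===== PORT B =====

-- state: (res, esc, buf) exactly as in Source B
def pvStepB (st : List Char × Bool × Option (List Char)) (c : Char) :
    List Char × Bool × Option (List Char) :=
  match st with
  | (res, esc, none) =>
    if esc then (res ++ [c], false, none)
    else if c = '\\' then (res ++ [c], true, none)
    else if c = '\'' then (res, false, some [])
    else (res ++ [c], false, none)
  | (res, esc, some buf) =>
    if c = '\'' then
      (res ++ '\'' :: buf.map (fun ch => if ch = '\n' then '\n' else ' ') ++ ['\''], esc, none)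
    else (res, esc, some (buf ++ [c]))

-- the post-loop flush of an unterminated quote
def pvFinishB (st : List Char × Bool × Option (List Char)) : List Char :=
  match st with
  | (res, _, none) => res
  | (res, _, some buf) => res ++ '\'' :: buf

def strip_single_quoted_py_alt (text : String) : String :=
  String.ofList (pvFinishB (text.toList.foldl pvStepB ([], false, none)))

-- ===== PRECONDITION & SPEC =====
def Spec_strip_single_quoted_py (text : String) (out : String) : Prop := out = strip_single_quoted_py_alt text
instance (text : String) (out : String) : Decidable (Spec_strip_single_quoted_py text out) := by unfold Spec_strip_single_quoted_py; infer_instance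

-- ===== CLAIM (what is proved, stated in full; the proofs are below) =====
def Claim_equal_strip_single_quoted_py : Prop := ∀ (text : String), Dom_strip_single_quoted_py text → Spec_strip_single_quoted_py text (strip_single_quoted_py text)

-- ===== LEMMAS AND PROOFS =====

-- in quote mode, a run without quotes is only buffered
theorem pv_fold_quote_free (u : List Char) (hu : '\'' ∉ u)
    (res buf : List Char) :
    u.foldl pvStepB (res, false, some buf) = (res, false, some (buf ++ u)) := by
  induction u generalizing buf with
  | nil => simp
  | cons c u ih =>
    have hc : c ≠ '\'' := fun h => hu (h ▸ List.mem_cons_self)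
    have hu' : '\'' ∉ u := fun h => hu (List.mem_cons_of_mem _ h)
    simp [List.foldl, pvStepB, hc, ih hu']

-- pvFindQuote characterisations
theorem pv_findQuote_none (l : List Char) (h : pvFindQuote l = none) : '\'' ∉ l := by
  induction l with
  | nil => simp
  | cons c rest ih =>
    by_cases hc : c = '\''
    · simp [pvFindQuote, hc] at h
    · simp [pvFindQuote, hc] at h
      simp [ih h]
      exact fun h' => hc h'.symm

theorem pv_findQuote_some (l : List Char) (j : Nat) (h : pvFindQuote l = some j) :
    '\'' ∉ l.take j ∧ l = l.take j ++ '\'' :: l.drop (j + 1) := by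
  induction l generalizing j with
  | nil => simp [pvFindQuote] at h
  | cons c rest ih =>
    by_cases hc : c = '\''
    · simp [pvFindQuote, hc] at h
      subst h hc
      simp
    · simp [pvFindQuote, hc] at h
      obtain ⟨j', hj', rfl⟩ := h
      obtain ⟨h1, h2⟩ := ih j' hj'
      constructor
      · simp [h1]
        exact fun h' => hc h'.symm
      · simpa using congrArg (c :: ·) h2

-- main invariant: folding B's step from a clean state appends A's result
theorem pv_main_aux (n : Nat) : ∀ (l : List Char), l.length ≤ n → ∀ res,
    pvFinishB (l.foldl pvStepB (res, false, none)) = res ++ pvStripA l := by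
  induction n with
  | zero =>
    intro l hl res
    match l, hl with
    | [], _ => simp [pvStripA, pvFinishB]
  | succ n ih0 =>
    intro l hl res
    have ih : ∀ (l' : List Char), l'.length < l.length → ∀ res,
        pvFinishB (l'.foldl pvStepB (res, false, none)) = res ++ pvStripA l' := by
      intro l' h' res'
      exact ih0 l' (by omega) res'
    match l with
    | [] => simp [pvStripA, pvFinishB]
    | c :: rest =>
      by_cases hb : c = '\\' ∧ rest ≠ []
      · obtain ⟨rfl, hne⟩ := hb
        match rest, hne with
        | d :: rest', _ =>
          have := ih rest' (by simp) (res ++ ['\\', d])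
          simp [List.foldl, pvStepB, pvStripA, this]
      · by_cases hq : c = '\''
        · subst hq
          match hfq : pvFindQuote rest with
          | none =>
            have hnin := pv_findQuote_none rest hfq
            simp [List.foldl, pvStepB, pvStripA, hfq,
              pv_fold_quote_free rest hnin res [], pvFinishB]
          | some j =>
            obtain ⟨h1, h2⟩ := pv_findQuote_some rest j hfq
            have hlen : (rest.drop (j + 1)).length < (('\'' :: rest)).length := by
              simp
            have ihx := ih (rest.drop (j + 1)) hlen
              (res ++ '\'' :: (rest.take j).map (fun ch => if ch = '\n' then '\n' else ' ') ++ ['\''])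
            conv_lhs => rw [show ('\'' :: rest) = '\'' :: (rest.take j ++ '\'' :: rest.drop (j+1)) from by rw [← h2]]
            simp only [List.foldl_cons, List.foldl_append]
            rw [show pvStepB (res, false, none) '\'' = (res, false, some []) from by simp [pvStepB]]
            rw [pv_fold_quote_free (rest.take j) h1 res []]
            rw [show pvStepB (res, false, some (([] : List Char) ++ rest.take j)) '\'' =
              (res ++ '\'' :: (rest.take j).map (fun ch => if ch = '\n' then '\n' else ' ') ++ ['\''], false, none) from by simp [pvStepB]]
            rw [ihx]
            have hblank : (rest.take j).map (fun ch => if ch = '\n' then '\n' else ' ')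
                = (rest.take j).map pvBlank := by
              apply List.map_congr_left; intro ch _
              by_cases h : ch = '\n' <;> simp [pvBlank, h]
            simp [pvStripA, hfq, hblank]
        · have hc : c ≠ '\\' ∨ rest = [] := by tauto
          rcases hc with hc | rfl
          · have := ih rest (by simp) (res ++ [c])
            simp [List.foldl, pvStepB, pvStripA, hq, hc, this]
          · by_cases hc : c = '\\'
            · subst hc
              simp [List.foldl, pvStepB, pvStripA, pvFinishB]
            · simp [List.foldl, pvStepB, pvStripA, hq, hc, pvFinishB]

-- ===== VERDICT (by name: the statement is the Claim_ definition above) =====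
theorem strip_single_quoted_py_spec : Claim_equal_strip_single_quoted_py := by
  intro text _
  unfold Spec_strip_single_quoted_py strip_single_quoted_py strip_single_quoted_py_alt
  rw [pv_main_aux text.toList.length text.toList (le_refl _) []]
  rfl
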